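-- pv_equiv track=rewrite | github.com/memespraysneks/Python-1515 | StudentGrades/student_data.py | get_student_list
-- ===== SOURCE A (Python) =====
-- def get_student_list(data: list) -> list:
--     IDs = []
--     for student in data:
--         IDs.append(student[0])
--     IDs = set(IDs)
--     IDs = list(IDs)
--     IDs.sort()
--     return IDs
-- ===== SOURCE B (Python) =====
-- def get_student_list(data: list) -> list:
--     ids = sorted(student[0] for student in data)
--     result = []
--     for x in ids:
--         # adjacency dedup: keep x only if it differs from the last kept element
--         if not result or result[-1] != x:
--             result.append(x)
--     return result
-- ===== Notes on version B (the rewrite author's own statement) =====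
-- stated objective: alternative
-- what changed: B sorts the projected IDs first and deduplicates by a single adjacency-based linear pass over the sorted list, maintaining no set at all, whereas A builds a hash set and sorts afterwards.
import Mathlib
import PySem

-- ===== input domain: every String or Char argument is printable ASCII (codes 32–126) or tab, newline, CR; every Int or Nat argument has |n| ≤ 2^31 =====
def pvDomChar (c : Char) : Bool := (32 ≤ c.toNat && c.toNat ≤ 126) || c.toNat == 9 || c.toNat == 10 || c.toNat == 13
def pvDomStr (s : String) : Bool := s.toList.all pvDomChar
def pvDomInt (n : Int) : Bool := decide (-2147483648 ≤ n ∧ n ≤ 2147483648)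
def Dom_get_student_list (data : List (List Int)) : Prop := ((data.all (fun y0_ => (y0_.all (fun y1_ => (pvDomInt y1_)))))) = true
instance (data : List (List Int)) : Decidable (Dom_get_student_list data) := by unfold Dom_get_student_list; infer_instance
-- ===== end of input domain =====

-- B sorts the projected IDs first and deduplicates by one adjacency pass (no set); alternative algorithm, same cost.


-- ===== PORT A =====
-- student[0]: PySem.List.pyGet?; the .getD 0 default is unreachable under Pre_ (every row nonempty)
def get_student_list (data : List (List Int)) : List Int :=
  let IDs := data.foldl (fun acc student => acc ++ [(PySem.List.pyGet? student 0).getD 0]) []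
  let IDs := PySem.Set.ofList IDs
  PySem.List.sorted IDs (fun x => x) false

-- ===== PORT B =====
-- the loop body: keep x only if result is empty or result[-1] != x  (result[-1] -> List.getLast?)
def dedupStep (result : List Int) (x : Int) : List Int :=
  if result = [] ∨ result.getLast? ≠ some x then result ++ [x] else result

def get_student_list_alt (data : List (List Int)) : List Int :=
  let ids := PySem.List.sorted (data.map (fun student => (PySem.List.pyGet? student 0).getD 0)) (fun x => x) false
  ids.foldl dedupStep []

-- ===== PRECONDITION & SPEC =====
-- Pre_ excludes exactly the inputs where A raises IndexError (an empty row: student[0]).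
def Pre_get_student_list (data : List (List Int)) : Prop := ∀ s ∈ data, s ≠ []
instance (data : List (List Int)) : Decidable (Pre_get_student_list data) := by unfold Pre_get_student_list; infer_instance
def pvWitness_get_student_list : List (List Int) := [[3, 10], [1], [3, 7], [2]]

def Spec_get_student_list (data : List (List Int)) (out : List Int) : Prop := out = get_student_list_alt data
instance (data : List (List Int)) (out : List Int) : Decidable (Spec_get_student_list data out) := by unfold Spec_get_student_list; infer_instance

-- ===== CLAIM (what is proved, stated in full; the proofs are below) =====
def Claim_equal_get_student_list : Prop := ∀ (data : List (List Int)), Dom_get_student_list data → Pre_get_student_list data → Spec_get_student_list data (get_student_list data)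

-- ===== LEMMAS AND PROOFS =====

-- proof-side recursive view of the adjacency-dedup loop
def dedupSorted : List Int → List Int
  | [] => []
  | [x] => [x]
  | x :: y :: t => if x = y then dedupSorted (y :: t) else x :: dedupSorted (y :: t)

theorem foldl_dedupStep_acc (ys : List Int) : ∀ (acc : List Int) (x : Int),
    ys.foldl dedupStep (acc ++ [x]) = acc ++ dedupSorted (x :: ys) := by
  induction ys with
  | nil => intro acc x; simp [dedupSorted]
  | cons y t ih =>
    intro acc x
    by_cases hxy : x = y
    · have hstep : dedupStep (acc ++ [x]) y = acc ++ [x] := by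
        simp [dedupStep, hxy]
      rw [List.foldl_cons, hstep, ih acc x]
      subst hxy
      simp [dedupSorted]
    · have hstep : dedupStep (acc ++ [x]) y = (acc ++ [x]) ++ [y] := by
        simp [dedupStep, hxy]
      rw [List.foldl_cons, hstep, ih (acc ++ [x]) y, List.append_assoc]
      simp [dedupSorted, hxy]

theorem foldl_dedupStep (ys : List Int) : ys.foldl dedupStep [] = dedupSorted ys := by
  cases ys with
  | nil => simp [dedupSorted]
  | cons x t =>
    have hs : dedupStep [] x = [x] := by simp [dedupStep]
    rw [List.foldl_cons, hs]
    simpa using foldl_dedupStep_acc t [] x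

theorem foldl_append_map (data : List (List Int)) (f : List Int → Int) (acc : List Int) :
    data.foldl (fun acc s => acc ++ [f s]) acc = acc ++ data.map f := by
  induction data generalizing acc with
  | nil => simp
  | cons h t ih => simp [List.foldl, ih, List.append_assoc]

theorem mem_dedupSorted (x : Int) : ∀ (ys : List Int), x ∈ dedupSorted ys ↔ x ∈ ys := by
  intro ys
  induction ys with
  | nil => simp [dedupSorted]
  | cons a t ih =>
    cases t with
    | nil => simp [dedupSorted]
    | cons b u =>
      by_cases hab : a = b
      · subst hab
        rw [show dedupSorted (a :: a :: u) = dedupSorted (a :: u) from by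
          simp [dedupSorted], ih]
        simp
      · rw [show dedupSorted (a :: b :: u) = a :: dedupSorted (b :: u) from by
          simp [dedupSorted, hab]]
        simp [ih]

theorem pairwise_lt_dedupSorted : ∀ (ys : List Int), ys.Pairwise (· ≤ ·) →
    (dedupSorted ys).Pairwise (· < ·) := by
  intro ys
  induction ys with
  | nil => intro _; simp [dedupSorted]
  | cons a t ih =>
    intro hp
    cases t with
    | nil => simp [dedupSorted]
    | cons b u =>
      have hp' : (b :: u).Pairwise (· ≤ ·) := hp.of_cons
      by_cases hab : a = b
      · simpa [dedupSorted, if_pos hab] using ih hp'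
      · have hle : ∀ z ∈ b :: u, a ≤ z := fun z hz => List.rel_of_pairwise_cons hp hz
        have hlt : ∀ z ∈ dedupSorted (b :: u), a < z := by
          intro z hz
          have hz' : z ∈ b :: u := (mem_dedupSorted z (b :: u)).1 hz
          rcases List.mem_cons.1 hz' with h | h
          · exact lt_of_le_of_ne (h ▸ hle b (by simp)) (h ▸ hab)
          · exact lt_of_lt_of_le (lt_of_le_of_ne (hle b (by simp)) hab)
              (List.rel_of_pairwise_cons hp' h)

        simpa [dedupSorted, if_neg hab] using (List.pairwise_cons.2 ⟨hlt, ih hp'⟩)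

-- ===== VERDICT (by name: the statement is the Claim_ definition above) =====
theorem get_student_list_spec : Claim_equal_get_student_list := by
  intro data _ _
  unfold Spec_get_student_list get_student_list get_student_list_alt
  simp only [foldl_append_map, List.nil_append]
  set f : List Int → Int := fun student => (PySem.List.pyGet? student 0).getD 0 with hf
  set ids := data.map f with hids
  set ys := PySem.List.sorted ids (fun x => x) false with hys
  rw [foldl_dedupStep ys]
  have hperm : (dedupSorted ys).Perm (PySem.Set.ofList ids) := by
    rw [List.perm_ext_iff_of_nodup
      ((pairwise_lt_dedupSorted ys (PySem.List.sorted_pairwise ids (fun x => x))).imp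
        (fun h => ne_of_lt h))
      (PySem.Set.nodup_ofList ids)]
    intro a
    rw [mem_dedupSorted, hys, PySem.List.mem_sorted, PySem.Set.mem_ofList]
  exact PySem.List.sorted_eq_of_perm_of_pairwise_lt (PySem.Set.ofList ids) (dedupSorted ys)
    (fun x => x) hperm
    (pairwise_lt_dedupSorted ys (PySem.List.sorted_pairwise ids (fun x => x)))
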